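-- pv_equiv track=rewrite | github.com/YevhenNovikov/Assignments | 11 - Лекція 7. - 150424 - 210424/L7.py | get_subjects_not_passed_by_all_students
-- ===== SOURCE A (Python) =====
-- def get_subjects_not_passed_by_all_students(student_exams):
--     subjects_not_passed = set()
--     subject_scores = {}
--
--     for student_exam in student_exams:
--         name, score, subject = student_exam
--         if subject not in subject_scores:
--             subject_scores[subject] = []
--         subject_scores[subject].append(score)
--
--     for subject, scores in subject_scores.items():
--         if all(score < 60 for score in scores):
--             subjects_not_passed.add(subject)
--
--     return subjects_not_passed
-- ===== SOURCE B (Python) =====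
-- def get_subjects_not_passed_by_all_students(student_exams):
--     all_subjects = set()
--     passed_subjects = set()
--     for _name, score, subject in student_exams:
--         all_subjects.add(subject)
--         if score >= 60:
--             passed_subjects.add(subject)
--     return all_subjects - passed_subjects
-- ===== Notes on version B (the rewrite author's own statement) =====
-- stated objective: simpler
-- what changed: Single pass maintaining two membership sets (all subjects, subjects with some score >= 60) and a final set difference, instead of grouping scores into per-subject lists and a second all()-scan over the groups.
import Mathlib
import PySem

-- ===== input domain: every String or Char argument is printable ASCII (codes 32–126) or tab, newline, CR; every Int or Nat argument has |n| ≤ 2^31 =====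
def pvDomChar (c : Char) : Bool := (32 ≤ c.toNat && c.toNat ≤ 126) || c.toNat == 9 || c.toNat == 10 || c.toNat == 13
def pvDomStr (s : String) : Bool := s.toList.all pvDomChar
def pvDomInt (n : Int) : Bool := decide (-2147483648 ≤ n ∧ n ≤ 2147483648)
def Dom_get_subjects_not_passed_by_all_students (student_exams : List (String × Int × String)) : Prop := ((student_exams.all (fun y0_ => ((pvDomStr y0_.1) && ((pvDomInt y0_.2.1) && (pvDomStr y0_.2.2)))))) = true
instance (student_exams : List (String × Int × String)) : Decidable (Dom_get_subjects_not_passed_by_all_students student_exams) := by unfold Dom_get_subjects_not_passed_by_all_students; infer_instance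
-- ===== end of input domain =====

-- B replaces A's per-subject score-list grouping plus second all()-scan by one pass over the
-- exams maintaining two membership sets and a final set difference (simpler decomposition).


-- ===== PORT A =====
-- first loop: group scores by subject ('if subject not in: d[subject] = []' then append);
-- second loop: over d.items(), add subject to the result set if all its scores are < 60
def get_subjects_not_passed_by_all_students (student_exams : List (String × Int × String)) : List String :=
  let subject_scores : PySem.Dict String (List Int) :=
    student_exams.foldl
      (fun d se =>
        let d' := if d.contains se.2.2 then d else d.insert se.2.2 ([] : List Int)
        d'.modify se.2.2 [] (fun l => l ++ [se.2.1]))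
      PySem.Dict.empty
  subject_scores.items.foldl
    (fun acc q => if q.2.all (fun score => decide (score < 60)) then PySem.Set.add acc q.1 else acc)
    PySem.Set.empty

-- ===== PORT B =====
-- one pass keeping (all_subjects, passed_subjects); result = all_subjects - passed_subjects
def get_subjects_not_passed_by_all_students_alt (student_exams : List (String × Int × String)) : List String :=
  let st : PySem.Set String × PySem.Set String :=
    student_exams.foldl
      (fun st se =>
        (PySem.Set.add st.1 se.2.2,
         if 60 ≤ se.2.1 then PySem.Set.add st.2 se.2.2 else st.2))
      (PySem.Set.empty, PySem.Set.empty)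
  PySem.Set.diff st.1 st.2

-- ===== PRECONDITION & SPEC =====
def Spec_get_subjects_not_passed_by_all_students (student_exams : List (String × Int × String)) (out : List String) : Prop := out = get_subjects_not_passed_by_all_students_alt student_exams
instance (student_exams : List (String × Int × String)) (out : List String) : Decidable (Spec_get_subjects_not_passed_by_all_students student_exams out) := by unfold Spec_get_subjects_not_passed_by_all_students; infer_instance

-- ===== CLAIM (what is proved, stated in full; the proofs are below) =====
def Claim_equal_get_subjects_not_passed_by_all_students : Prop := ∀ (student_exams : List (String × Int × String)), Dom_get_subjects_not_passed_by_all_students student_exams → Spec_get_subjects_not_passed_by_all_students student_exams (get_subjects_not_passed_by_all_students student_exams)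

-- ===== LEMMAS AND PROOFS =====

-- A's first-loop body equals a plain modify (the 'if missing insert []' is absorbed)
theorem pvStepEq (d : PySem.Dict String (List Int)) (k : String) (v : Int) :
    (if d.contains k then d else d.insert k ([] : List Int)).modify k [] (fun l => l ++ [v])
      = d.modify k [] (fun l => l ++ [v]) := by
  by_cases h : d.contains k = true
  · simp [h]
  · simp only [h, Bool.false_eq_true, ↓reduceIte, PySem.Dict.modify,
      PySem.Dict.getD_insert_self, PySem.Dict.insert_insert_self,
      PySem.Dict.getD_of_not_contains d ([] : List Int) (by simpa using h)]

theorem pvFoldlAddIf (q : String → Bool) :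
    ∀ (l acc : List String), l.Nodup → (∀ x ∈ l, x ∉ acc) →
      l.foldl (fun a x => if q x then PySem.Set.add a x else a) acc = acc ++ l.filter q := by
  intro l
  induction l with
  | nil => intro acc _ _; simp
  | cons x l ih =>
    intro acc hnd hdisj
    have hxl : x ∉ l := (List.nodup_cons.mp hnd).1
    have hnd' : l.Nodup := (List.nodup_cons.mp hnd).2
    have hxacc : x ∉ acc := hdisj x (List.mem_cons_self)
    by_cases hq : q x = true
    · have hadd : PySem.Set.add acc x = acc ++ [x] := by
        simp [PySem.Set.add, PySem.Set.contains, hxacc]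
      simp only [List.foldl_cons, hq, ↓reduceIte, hadd]
      rw [ih (acc ++ [x]) hnd' ?_, List.filter_cons_of_pos hq]
      · simp
      · intro y hy
        simp only [List.mem_append, List.mem_singleton]
        rintro (h | rfl)
        · exact hdisj y (List.mem_cons_of_mem _ hy) h
        · exact hxl hy
    · simp only [List.foldl_cons, hq, Bool.false_eq_true, ↓reduceIte]
      rw [ih acc hnd' (fun y hy => hdisj y (List.mem_cons_of_mem _ hy)),
        List.filter_cons_of_neg (by simpa using hq)]

-- the pair fold's components
theorem pvFoldFst (xs : List (String × Int × String)) :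
    ∀ (a b : PySem.Set String),
      (xs.foldl (fun st se =>
        ((PySem.Set.add st.1 se.2.2 : PySem.Set String),
         if 60 ≤ se.2.1 then PySem.Set.add st.2 se.2.2 else st.2)) (a, b)).1
      = xs.foldl (fun a se => PySem.Set.add a se.2.2) a := by
  induction xs with
  | nil => intro a b; rfl
  | cons x xs ih => intro a b; simp only [List.foldl_cons]; exact ih _ _

theorem pvFoldSnd (xs : List (String × Int × String)) :
    ∀ (a b : PySem.Set String),
      (xs.foldl (fun st se =>
        ((PySem.Set.add st.1 se.2.2 : PySem.Set String),
         if 60 ≤ se.2.1 then PySem.Set.add st.2 se.2.2 else st.2)) (a, b)).2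
      = xs.foldl (fun b se => if 60 ≤ se.2.1 then PySem.Set.add b se.2.2 else b) b := by
  induction xs with
  | nil => intro a b; rfl
  | cons x xs ih => intro a b; simp only [List.foldl_cons]; exact ih _ _

theorem pvMemPassed (xs : List (String × Int × String)) :
    ∀ (b : PySem.Set String) (y : String),
      (y ∈ xs.foldl (fun b se => if 60 ≤ se.2.1 then PySem.Set.add b se.2.2 else b) b)
      ↔ y ∈ b ∨ ∃ se ∈ xs, 60 ≤ se.2.1 ∧ se.2.2 = y := by
  induction xs with
  | nil => intro b y; simp
  | cons x xs ih =>
    intro b y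
    simp only [List.foldl_cons, List.mem_cons]
    by_cases hx : (60 : Int) ≤ x.2.1
    · rw [if_pos hx, ih]
      simp only [PySem.Set.mem_add]
      constructor
      · rintro ((h | h) | ⟨se, hse, h1, h2⟩)
        · exact Or.inl h
        · exact Or.inr ⟨x, Or.inl rfl, hx, h.symm⟩
        · exact Or.inr ⟨se, Or.inr hse, h1, h2⟩
      · rintro (h | ⟨se, (rfl | hse), h1, h2⟩)
        · exact Or.inl (Or.inl h)
        · exact Or.inl (Or.inr h2.symm)
        · exact Or.inr ⟨se, hse, h1, h2⟩
    · rw [if_neg hx, ih]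
      constructor
      · rintro (h | ⟨se, hse, h1, h2⟩)
        · exact Or.inl h
        · exact Or.inr ⟨se, Or.inr hse, h1, h2⟩
      · rintro (h | ⟨se, (rfl | hse), h1, h2⟩)
        · exact Or.inl h
        · exact absurd h1 hx
        · exact Or.inr ⟨se, hse, h1, h2⟩

-- ===== VERDICT (by name: the statement is the Claim_ definition above) =====
theorem get_subjects_not_passed_by_all_students_spec : Claim_equal_get_subjects_not_passed_by_all_students := by
  intro xs _
  unfold Spec_get_subjects_not_passed_by_all_students
  unfold get_subjects_not_passed_by_all_students get_subjects_not_passed_by_all_students_alt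
  simp only [pvStepEq, pvFoldFst, pvFoldSnd]
  -- name the grouping dict and the two B-side sets
  set d : PySem.Dict String (List Int) :=
    xs.foldl (fun d se => d.modify se.2.2 [] (fun l => l ++ [se.2.1])) PySem.Dict.empty with hd
  set passed : PySem.Set String :=
    xs.foldl (fun b se => if 60 ≤ se.2.1 then PySem.Set.add b se.2.2 else b) [] with hpassed
  -- the dict's keys (first-occurrence order) = B's all_subjects
  have hkeys : d.keys = PySem.Set.ofList (xs.map (fun se => se.2.2)) := by
    rw [hd, PySem.Dict.keys_foldl_modify_key xs (fun se => se.2.2) []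
      (fun d se => fun l => l ++ [se.2.1]) PySem.Dict.empty]
    simp [PySem.Set.update, PySem.Set.ofList_eq_foldl, PySem.Dict.keys, PySem.Dict.empty]
  have hallsub : xs.foldl (fun a se => PySem.Set.add a se.2.2) ([] : PySem.Set String)
      = PySem.Set.ofList (xs.map (fun se => se.2.2)) := by
    rw [PySem.Set.ofList_eq_foldl, List.foldl_map]
  have hnd : d.keys.Nodup := by
    rw [hkeys]; exact PySem.Set.nodup_ofList _
  -- the grouped scores of subject c
  have hgetD : ∀ c, d.getD c [] = (xs.filter (fun se => se.2.2 == c)).map (fun se => se.2.1) := by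
    intro c
    have h := PySem.Dict.getD_foldl_modify_append
      (xs.map (fun se => (se.2.2, se.2.1))) (PySem.Dict.empty : PySem.Dict String (List Int)) c
    simp only [List.foldl_map] at h
    rw [hd, h]
    simp [List.filter_map, Function.comp_def, PySem.Dict.getD_empty]
  -- rewrite A's second loop into a filter over d.keys
  rw [PySem.Dict.items_eq_map_keys d hnd ([] : List Int), List.foldl_map]
  have := pvFoldlAddIf (fun k => (d.getD k []).all (fun score => decide (score < 60))) d.keys
    [] hnd (by simp)
  simp only [PySem.Set.empty] at this ⊢
  rw [this, List.nil_append]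
  -- B's result is a filter over the same list
  rw [PySem.Set.diff, hallsub, ← hkeys]
  -- pointwise agreement of the two filter predicates
  apply List.filter_congr
  intro k _
  rw [hgetD k, Bool.eq_iff_iff]
  simp only [List.all_eq_true, List.mem_map, List.mem_filter, beq_iff_eq, decide_eq_true_eq,
    Bool.not_eq_true', ← Bool.not_eq_true, PySem.Set.contains, List.contains_iff_mem]
  rw [pvMemPassed]
  simp only [List.not_mem_nil, false_or]
  constructor
  · rintro h ⟨se, hse, h60, rfl⟩
    exact absurd (h se.2.1 ⟨se, ⟨hse, rfl⟩, rfl⟩) (not_lt.mpr h60)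
  · rintro h x ⟨se, ⟨hse, hsub⟩, rfl⟩
    by_contra hge
    exact h ⟨se, hse, not_lt.1 (by simpa using hge), hsub⟩
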